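-- pv_equiv track=rewrite | github.com/MrBrantCode/unitest_baseline | mut_generate/mist_train_taco/taco_8009/solution.py | calculate_ink_density
-- ===== SOURCE A (Python) =====
-- def calculate_ink_density(drops):
--     # Initialize the 10x10 board with 0 density
--     board = [[0] * 10 for _ in range(10)]
--
--     # Define the spread patterns for small, medium, and large drops
--     small = [(-1, 0), (0, -1), (0, 0), (0, 1), (1, 0)]
--     med = [(-1, -1), (-1, 0), (-1, 1), (0, -1), (0, 0), (0, 1), (1, -1), (1, 0), (1, 1)]
--     large = [(-2, 0), (-1, -1), (-1, 0), (-1, 1), (0, -2), (0, -1), (0, 0), (0, 1), (0, 2), (1, -1), (1, 0), (1, 1), (2, 0)]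
--
--     # Process each drop
--     for (x, y, size) in drops:
--         dyx = [small, med, large][size - 1]
--         for (dy, dx) in dyx:
--             (ny, nx) = (y + dy, x + dx)
--             if 0 <= nx < 10 and 0 <= ny < 10:
--                 board[ny][nx] += 1
--
--     # Calculate the number of cells with zero density
--     zero_density_count = sum(1 for row in board for cell in row if cell == 0)
--
--     # Calculate the maximum density value
--     max_density = max(max(row) for row in board)
--
--     return zero_density_count, max_density
-- ===== SOURCE B (Python) =====
-- def calculate_ink_density(drops):
--     # Same spread patterns as the original module constants
--     small = [(-1, 0), (0, -1), (0, 0), (0, 1), (1, 0)]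
--     med = [(-1, -1), (-1, 0), (-1, 1), (0, -1), (0, 0), (0, 1), (1, -1), (1, 0), (1, 1)]
--     large = [(-2, 0), (-1, -1), (-1, 0), (-1, 1), (0, -2), (0, -1), (0, 0), (0, 1), (0, 2), (1, -1), (1, 0), (1, 1), (2, 0)]
--     patterns = [small, med, large]
--
--     # Inverted traversal: no board and no stamping. For each of the 100 cells,
--     # count the drops whose pattern covers it (offset membership test), and
--     # accumulate the zero-count and the maximum in the same single pass.
--     zeros = 0
--     mx = 0
--     for i in range(10):
--         for j in range(10):
--             d = 0
--             for (x, y, size) in drops: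
--                 if (i - y, j - x) in patterns[size - 1]:
--                     d += 1
--             if d == 0:
--                 zeros += 1
--             if d > mx:
--                 mx = d
--     return zeros, mx
-- ===== Notes on version B (the rewrite author's own statement) =====
-- stated objective: alternative
-- what changed: B inverts the traversal: instead of stamping each drop's pattern onto a 10x10 board and then scanning the board twice, it visits each of the 100 cells once and counts the drops whose pattern covers that cell (an offset-membership test), accumulating the zero count and the maximum in that same single pass; no board exists.
import Mathlib
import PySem

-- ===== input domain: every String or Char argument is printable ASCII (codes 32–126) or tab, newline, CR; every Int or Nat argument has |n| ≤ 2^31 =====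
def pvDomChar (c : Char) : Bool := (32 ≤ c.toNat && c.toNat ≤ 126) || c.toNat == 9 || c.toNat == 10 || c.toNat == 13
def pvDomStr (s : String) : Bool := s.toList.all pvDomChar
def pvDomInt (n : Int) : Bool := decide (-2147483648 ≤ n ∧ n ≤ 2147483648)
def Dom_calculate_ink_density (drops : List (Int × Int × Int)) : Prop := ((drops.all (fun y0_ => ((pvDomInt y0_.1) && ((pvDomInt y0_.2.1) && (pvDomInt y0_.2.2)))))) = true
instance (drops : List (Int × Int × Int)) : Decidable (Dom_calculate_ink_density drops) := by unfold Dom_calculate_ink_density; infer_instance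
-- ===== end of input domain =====

-- B inverts the traversal: it visits each of the 100 cells once and counts the drops whose
-- pattern covers it, accumulating zero-count and maximum in that same pass (no board at all);
-- objective: alternative algorithm, similar cost.

-- ===== PORT A =====
-- the three spread patterns (module-level data shared by both Pythons)
def inkSmall : List (Int × Int) := [(-1, 0), (0, -1), (0, 0), (0, 1), (1, 0)]
def inkMed : List (Int × Int) :=
  [(-1, -1), (-1, 0), (-1, 1), (0, -1), (0, 0), (0, 1), (1, -1), (1, 0), (1, 1)]
def inkLarge : List (Int × Int) :=
  [(-2, 0), (-1, -1), (-1, 0), (-1, 1), (0, -2), (0, -1), (0, 0), (0, 1), (0, 2),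
   (1, -1), (1, 0), (1, 1), (2, 0)]

def calculate_ink_density (drops : List (Int × Int × Int)) : Int × Int :=
  -- board = [[0]*10 for _ in range(10)]
  let board0 : List (List Int) := List.replicate 10 (List.replicate 10 0)
  let board := drops.foldl (fun board t =>
    let x := t.1; let y := t.2.1; let size := t.2.2
    -- dyx = [small, med, large][size - 1]  (Python negative-index wraparound; default [] only outside Pre_)
    let dyx := PySem.List.pyGetD [inkSmall, inkMed, inkLarge] (size - 1) []
    dyx.foldl (fun board q =>
      let ny := y + q.1; let nx := x + q.2
      if 0 ≤ nx ∧ nx < 10 ∧ 0 ≤ ny ∧ ny < 10 then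
        board.modify ny.toNat (fun row => row.modify nx.toNat (· + 1))
      else board) board) board0
  -- zero_density_count = sum(1 for row in board for cell in row if cell == 0)
  let zero : Int := board.foldl (fun acc row =>
    row.foldl (fun a c => if c = 0 then a + 1 else a) acc) 0
  -- max_density = max(max(row) for row in board)   (board and its rows are never empty; getD 0 unreachable)
  let mx : Int := (PySem.List.max? (board.map (fun row =>
    (PySem.List.max? row (fun v => v)).getD 0)) (fun v => v)).getD 0
  (zero, mx)

-- ===== PORT B =====
def calculate_ink_density_alt (drops : List (Int × Int × Int)) : Int × Int :=
  -- for i in range(10): for j in range(10): count covering drops; update zeros and mx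
  (PySem.List.pyRange 0 10 1).foldl (fun s i =>
    (PySem.List.pyRange 0 10 1).foldl (fun s j =>
      let d : Int := drops.foldl (fun d t =>
        let x := t.1; let y := t.2.1; let size := t.2.2
        if (i - y, j - x) ∈ PySem.List.pyGetD [inkSmall, inkMed, inkLarge] (size - 1) []
        then d + 1 else d) 0
      let zeros := if d = 0 then s.1 + 1 else s.1
      let mx := if s.2 < d then d else s.2
      (zeros, mx)) s) ((0 : Int), (0 : Int))

-- ===== PRECONDITION & SPEC =====
-- Pre_ excludes exactly the drops whose size is outside -2..3, on which Python's
-- patterns[size - 1] raises IndexError in BOTH programs.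
def Pre_calculate_ink_density (drops : List (Int × Int × Int)) : Prop :=
  ∀ t ∈ drops, -2 ≤ t.2.2 ∧ t.2.2 ≤ 3
instance (drops : List (Int × Int × Int)) : Decidable (Pre_calculate_ink_density drops) := by
  unfold Pre_calculate_ink_density; infer_instance

def pvWitness_calculate_ink_density : (List (Int × Int × Int)) := [(0, 0, 1), (9, 9, 3), (4, 4, 2)]

def Spec_calculate_ink_density (drops : List (Int × Int × Int)) (out : Int × Int) : Prop :=
  out = calculate_ink_density_alt drops
instance (drops : List (Int × Int × Int)) (out : Int × Int) :
    Decidable (Spec_calculate_ink_density drops out) := by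
  unfold Spec_calculate_ink_density; infer_instance

-- ===== CLAIM (what is proved, stated in full; the proofs are below) =====
def Claim_equal_calculate_ink_density : Prop :=
  ∀ (drops : List (Int × Int × Int)), Dom_calculate_ink_density drops →
    Pre_calculate_ink_density drops →
    Spec_calculate_ink_density drops (calculate_ink_density drops)

-- ===== LEMMAS AND PROOFS =====

-- proof-only helpers: the list of in-bounds cells hit by one drop / by all drops
def hitsOf (t : Int × Int × Int) : List (Int × Int) :=
  (PySem.List.pyGetD [inkSmall, inkMed, inkLarge] (t.2.2 - 1) []).filterMap (fun q =>
    if 0 ≤ t.1 + q.2 ∧ t.1 + q.2 < 10 ∧ 0 ≤ t.2.1 + q.1 ∧ t.2.1 + q.1 < 10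
    then some (t.2.1 + q.1, t.1 + q.2) else none)

def inkHits (drops : List (Int × Int × Int)) : List (Int × Int) := drops.flatMap hitsOf

def inkGrid (c : Int × Int → Int) : List (List Int) :=
  (List.range 10).map (fun (i : Nat) => (List.range 10).map (fun (j : Nat) => c ((i : Int), (j : Int))))

def allCells : List (Int × Int) :=
  (List.range 10).flatMap (fun (i : Nat) => (List.range 10).map (fun (j : Nat) => ((i : Int), (j : Int))))

def bstep (board : List (List Int)) (p : Int × Int) : List (List Int) :=
  board.modify p.1.toNat (fun row => row.modify p.2.toNat (· + 1))

lemma foldl_if_filterMap {α β γ : Type} (l : List β) (C : β → Prop) [DecidablePred C]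
    (k : β → γ) (f : α → γ → α) (a : α) :
    l.foldl (fun acc q => if C q then f acc (k q) else acc) a
      = (l.filterMap (fun q => if C q then some (k q) else none)).foldl f a := by
  induction l generalizing a with
  | nil => rfl
  | cons x t ih => by_cases h : C x <;> simp [h, ih]

lemma mem_inkHits {drops : List (Int × Int × Int)} {p : Int × Int} (hp : p ∈ inkHits drops) :
    0 ≤ p.1 ∧ p.1 < 10 ∧ 0 ≤ p.2 ∧ p.2 < 10 := by
  simp only [inkHits, List.mem_flatMap, hitsOf, List.mem_filterMap] at hp
  obtain ⟨t, -, q, -, h⟩ := hp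
  split at h
  · cases h; omega
  · cases h

lemma mem_allCells {p : Int × Int} :
    p ∈ allCells ↔ 0 ≤ p.1 ∧ p.1 < 10 ∧ 0 ≤ p.2 ∧ p.2 < 10 := by
  obtain ⟨a, b⟩ := p
  constructor
  · intro h
    obtain ⟨i, hi, hm⟩ := List.mem_flatMap.mp h
    obtain ⟨j, hj, heq⟩ := List.mem_map.mp hm
    rw [List.mem_range] at hi hj
    injection heq with e1 e2
    subst e1; subst e2
    refine ⟨by omega, by omega, by omega, by omega⟩
  · rintro ⟨h1, h2, h3, h4⟩
    refine List.mem_flatMap.mpr ⟨a.toNat, List.mem_range.mpr (by omega),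
      List.mem_map.mpr ⟨b.toNat, List.mem_range.mpr (by omega), ?_⟩⟩
    rw [Int.toNat_of_nonneg h1, Int.toNat_of_nonneg h3]

lemma bstep_inkGrid (c : Int × Int → Int) (p : Int × Int)
    (h1 : 0 ≤ p.1) (h2 : p.1 < 10) (h3 : 0 ≤ p.2) (h4 : p.2 < 10) :
    bstep (inkGrid c) p = inkGrid (fun q => if q = p then c q + 1 else c q) := by
  apply List.ext_getElem
  · simp [bstep, inkGrid]
  · intro i hi hi'
    simp only [bstep, inkGrid, List.length_modify, List.length_map, List.length_range] at hi hi' ⊢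
    rw [List.getElem_modify]
    by_cases hip : p.1.toNat = i
    · rw [if_pos hip]
      simp only [List.getElem_map, List.getElem_range]
      apply List.ext_getElem
      · simp
      · intro j hj hj'
        simp only [List.length_modify, List.length_map, List.length_range] at hj hj'
        rw [List.getElem_modify]
        simp only [List.getElem_map, List.getElem_range]
        by_cases hjp : p.2.toNat = j
        · rw [if_pos hjp]
          have e1 : ((i : Int), (j : Int)) = p := by
            obtain ⟨pa, pb⟩ := p; simp_all; omega
          rw [if_pos e1, e1]
        · have e1 : ¬ ((i : Int), (j : Int)) = p := by
            obtain ⟨pa, pb⟩ := p; simp_all; omega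
          rw [if_neg hjp, if_neg e1]
    · rw [if_neg hip]
      simp only [List.getElem_map, List.getElem_range]
      apply List.ext_getElem
      · simp
      · intro j hj hj'
        simp only [List.length_map, List.length_range] at hj hj'
        simp only [List.getElem_map, List.getElem_range]
        have e1 : ¬ ((i : Int), (j : Int)) = p := by
          obtain ⟨pa, pb⟩ := p; simp_all; omega
        rw [if_neg e1]

lemma foldl_bstep_inkGrid (H : List (Int × Int)) (c : Int × Int → Int)
    (hH : ∀ p ∈ H, 0 ≤ p.1 ∧ p.1 < 10 ∧ 0 ≤ p.2 ∧ p.2 < 10) :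
    H.foldl bstep (inkGrid c) = inkGrid (fun q => c q + (H.count q : Int)) := by
  induction H generalizing c with
  | nil => simp [inkGrid]
  | cons p t ih =>
    obtain ⟨h1, h2, h3, h4⟩ := hH p (List.mem_cons_self ..)
    rw [List.foldl_cons, bstep_inkGrid c p h1 h2 h3 h4,
      ih _ (fun q hq => hH q (List.mem_cons_of_mem _ hq))]
    refine congrArg inkGrid (funext fun q => ?_)
    by_cases hqp : q = p
    · subst hqp
      simp only [List.count_cons, BEq.rfl, if_true]
      push_cast
      ring
    · simp [hqp, Ne.symm hqp]

lemma flatten_inkGrid (c : Int × Int → Int) :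
    (inkGrid c).flatMap id = allCells.map c := by
  simp [inkGrid, allCells, List.map_flatMap, List.flatMap_map, Function.comp_def, List.map_map]

lemma foldl_max_assoc (r : List Int) (a b : Int) :
    r.foldl max (max a b) = max a (r.foldl max b) := by
  induction r generalizing b with
  | nil => rfl
  | cons x t ih => simpa [List.foldl_cons, max_assoc] using ih (max b x)

lemma max_getD_eq_foldl (l : List Int) (h : ∀ v ∈ l, 0 ≤ v) :
    (PySem.List.max? l (fun v => v)).getD 0 = l.foldl max 0 := by
  cases l with
  | nil => rfl
  | cons x t =>
    rw [PySem.List.max?_id_cons, Option.getD_some, List.foldl_cons,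
      max_eq_right (h x (List.mem_cons_self ..))]

lemma rows_max_flatten (rows : List (List Int)) (a : Int) (ha : 0 ≤ a) :
    (rows.map (fun r => r.foldl max 0)).foldl max a = (rows.flatMap id).foldl max a := by
  induction rows generalizing a with
  | nil => rfl
  | cons r rs ih =>
    simp only [List.map_cons, List.foldl_cons, List.flatMap_cons, id, List.foldl_append]
    have h1 : r.foldl max a = max a (r.foldl max 0) := by
      have h := foldl_max_assoc r a 0
      rwa [max_eq_left ha] at h
    rw [h1, ih (max a (r.foldl max 0)) (le_trans ha (le_max_left ..))]

-- the pattern Python indexes is always one of the three concrete Nodup lists (under Pre_)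
lemma pat_nodup (k : Int) (h1 : -3 ≤ k) (h2 : k ≤ 2) :
    (PySem.List.pyGetD [inkSmall, inkMed, inkLarge] k []).Nodup := by
  interval_cases k <;> decide

-- the number of covering drops B computes at an in-bounds cell is the multiplicity of that
-- cell in the list of all stamped in-bounds hits
lemma dval_eq_count (drops : List (Int × Int × Int))
    (hPre : Pre_calculate_ink_density drops) (i j : Int)
    (hi1 : 0 ≤ i) (hi2 : i < 10) (hj1 : 0 ≤ j) (hj2 : j < 10) :
    drops.foldl (fun d t =>
        if (i - t.2.1, j - t.1) ∈ PySem.List.pyGetD [inkSmall, inkMed, inkLarge] (t.2.2 - 1) []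
        then d + 1 else d) (0 : Int)
      = (List.count (i, j) (inkHits drops) : Int) := by
  rw [PySem.List.foldl_ite_add_one, zero_add]
  congr 1
  induction drops with
  | nil => rfl
  | cons t rest ih =>
    have hPre' : Pre_calculate_ink_density rest :=
      fun u hu => hPre u (List.mem_cons_of_mem _ hu)
    obtain ⟨hs1, hs2⟩ := hPre t (List.mem_cons_self ..)
    have hnd := pat_nodup (t.2.2 - 1) (by omega) (by omega)
    rw [List.countP_cons, ih hPre']
    simp only [inkHits, List.flatMap_cons, List.count_append]
    have hone : List.count (i, j) (hitsOf t)
        = if (i - t.2.1, j - t.1)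
            ∈ PySem.List.pyGetD [inkSmall, inkMed, inkLarge] (t.2.2 - 1) [] then 1 else 0 := by
      rw [hitsOf, List.count_filterMap]
      have hcp : ∀ q : Int × Int,
          ((if 0 ≤ t.1 + q.2 ∧ t.1 + q.2 < 10 ∧ 0 ≤ t.2.1 + q.1 ∧ t.2.1 + q.1 < 10
            then some (t.2.1 + q.1, t.1 + q.2) else none) == some (i, j))
          = (q == (i - t.2.1, j - t.1)) := by
        intro q
        obtain ⟨qa, qb⟩ := q
        rw [Bool.eq_iff_iff]
        by_cases hb : 0 ≤ t.1 + qb ∧ t.1 + qb < 10 ∧ 0 ≤ t.2.1 + qa ∧ t.2.1 + qa < 10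
        · rw [if_pos hb]
          simp only [beq_iff_eq, Option.some.injEq, Prod.mk.injEq]
          constructor
          · rintro ⟨h1, h2⟩; exact ⟨by omega, by omega⟩
          · rintro ⟨h1, h2⟩; exact ⟨by omega, by omega⟩
        · rw [if_neg hb]
          simp only [beq_iff_eq, Prod.mk.injEq]
          constructor
          · intro h; simp at h
          · rintro ⟨h1, h2⟩
            subst h1; subst h2
            exact absurd ⟨by omega, by omega, by omega, by omega⟩ hb
      rw [List.countP_congr (fun q _ => by rw [hcp q])]
      by_cases hm : (i - t.2.1, j - t.1)
          ∈ PySem.List.pyGetD [inkSmall, inkMed, inkLarge] (t.2.2 - 1) []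
      · rw [if_pos hm]
        exact List.count_eq_one_of_mem hnd hm
      · rw [if_neg hm]
        exact List.count_eq_zero_of_not_mem hm
    rw [hone]
    by_cases hm : (i - t.2.1, j - t.1)
        ∈ PySem.List.pyGetD [inkSmall, inkMed, inkLarge] (t.2.2 - 1) [] <;>
      simp [hm] <;> omega

-- B's cell loop, characterised: zeros accumulates the count of zero cells, mx the running max
lemma bfold_char (f : Int × Int → Int) (L : List (Int × Int)) (z m : Int) :
    L.foldl (fun s p =>
        (if f p = 0 then s.1 + 1 else s.1, if s.2 < f p then f p else s.2)) (z, m)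
      = (z + (L.countP (fun p => f p = 0) : Int), (L.map f).foldl max m) := by
  induction L generalizing z m with
  | nil => simp
  | cons p t ih =>
    rw [List.foldl_cons, List.countP_cons, List.map_cons, List.foldl_cons, ih]
    have hmax : (if m < f p then f p else m) = max m (f p) := by
      rw [max_def]; split_ifs <;> omega
    rw [hmax]
    by_cases h : f p = 0 <;> simp [h] <;> omega

-- B as a single fold over allCells
lemma alt_allCells (drops : List (Int × Int × Int)) :
    calculate_ink_density_alt drops
      = allCells.foldl (fun s p =>
          let d : Int := drops.foldl (fun d t =>
            if (p.1 - t.2.1, p.2 - t.1) ∈ PySem.List.pyGetD [inkSmall, inkMed, inkLarge] (t.2.2 - 1) []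
            then d + 1 else d) 0
          (if d = 0 then s.1 + 1 else s.1, if s.2 < d then d else s.2)) ((0 : Int), (0 : Int)) := by
  simp only [calculate_ink_density_alt]
  rw [PySem.List.pyRange_one]
  norm_num
  simp only [List.foldl_map, allCells, List.foldl_flatMap]
  simp only [show Int.toNat 10 = 10 from rfl]

lemma AB_eq (drops : List (Int × Int × Int)) (hPre : Pre_calculate_ink_density drops) :
    calculate_ink_density drops = calculate_ink_density_alt drops := by
  -- name the multiplicity function of the stamped hits
  set c : Int × Int → Int := fun p => (List.count p (inkHits drops) : Int) with hc
  -- the A-side board is the grid of multiplicities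
  have hA : ∀ b : List (List Int),
      drops.foldl (fun board t =>
        (PySem.List.pyGetD [inkSmall, inkMed, inkLarge] (t.2.2 - 1) []).foldl (fun board q =>
          if 0 ≤ t.1 + q.2 ∧ t.1 + q.2 < 10 ∧ 0 ≤ t.2.1 + q.1 ∧ t.2.1 + q.1 < 10 then
            board.modify (t.2.1 + q.1).toNat (fun row => row.modify (t.1 + q.2).toNat (· + 1))
          else board) board) b
      = (inkHits drops).foldl bstep b := by
    intro b
    rw [inkHits, List.foldl_flatMap]
    congr 1
    funext acc t
    exact foldl_if_filterMap _
      (fun (q : Int × Int) => 0 ≤ t.1 + q.2 ∧ t.1 + q.2 < 10 ∧ 0 ≤ t.2.1 + q.1 ∧ t.2.1 + q.1 < 10)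
      (fun (q : Int × Int) => (t.2.1 + q.1, t.1 + q.2))
      (fun board p => board.modify p.1.toNat (fun row => row.modify p.2.toNat (· + 1))) acc
  have h0 : (List.replicate 10 (List.replicate 10 (0 : Int))) = inkGrid (fun _ => 0) := rfl
  have hboard : drops.foldl (fun board t =>
        (PySem.List.pyGetD [inkSmall, inkMed, inkLarge] (t.2.2 - 1) []).foldl (fun board q =>
          if 0 ≤ t.1 + q.2 ∧ t.1 + q.2 < 10 ∧ 0 ≤ t.2.1 + q.1 ∧ t.2.1 + q.1 < 10 then
            board.modify (t.2.1 + q.1).toNat (fun row => row.modify (t.1 + q.2).toNat (· + 1))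
          else board) board) (List.replicate 10 (List.replicate 10 (0 : Int)))
      = inkGrid c := by
    rw [h0, hA, foldl_bstep_inkGrid (inkHits drops) (fun _ => 0) (fun p hp => mem_inkHits hp)]
    simp [hc]
  -- A's zero scan = countP over allCells, A's max scan = running max over allCells.map c
  have entries_nonneg : ∀ r ∈ inkGrid c, ∀ v ∈ r, 0 ≤ v := by
    intro r hr v hv
    simp only [inkGrid, List.mem_map] at hr
    obtain ⟨i, -, rfl⟩ := hr
    simp only [List.mem_map] at hv
    obtain ⟨j, -, rfl⟩ := hv
    exact Int.natCast_nonneg _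
  have hzeroA : (inkGrid c).foldl (fun acc row =>
        row.foldl (fun a v => if v = 0 then a + 1 else a) acc) (0 : Int)
      = (allCells.countP (fun p => c p = 0) : Int) := by
    rw [← List.foldl_flatMap,
      show (inkGrid c).flatMap (fun row => row) = allCells.map c from flatten_inkGrid c,
      PySem.List.foldl_ite_add_one, zero_add, List.countP_map]
    simp [Function.comp_def]
  have hmaxA : (PySem.List.max? ((inkGrid c).map (fun row =>
        (PySem.List.max? row (fun v => v)).getD 0)) (fun v => v)).getD 0
      = (allCells.map c).foldl max 0 := by
    have hrowmax : (inkGrid c).map (fun row => (PySem.List.max? row (fun v => v)).getD 0)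
        = (inkGrid c).map (fun row => row.foldl max 0) :=
      List.map_congr_left (fun r hr => max_getD_eq_foldl r (entries_nonneg r hr))
    rw [hrowmax]
    have houter : ∀ v ∈ (inkGrid c).map (fun row => row.foldl max 0), 0 ≤ v := by
      intro v hv
      simp only [List.mem_map] at hv
      obtain ⟨r, -, rfl⟩ := hv
      exact (PySem.List.le_foldl_max r 0).1
    rw [max_getD_eq_foldl _ houter, rows_max_flatten _ 0 le_rfl, flatten_inkGrid]
  -- B's cell counts agree with the multiplicities on allCells
  have hdval : ∀ p ∈ allCells,
      drops.foldl (fun d t =>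
        if (p.1 - t.2.1, p.2 - t.1) ∈ PySem.List.pyGetD [inkSmall, inkMed, inkLarge] (t.2.2 - 1) []
        then d + 1 else d) (0 : Int) = c p := by
    intro p hp
    obtain ⟨h1, h2, h3, h4⟩ := mem_allCells.mp hp
    exact dval_eq_count drops hPre p.1 p.2 h1 h2 h3 h4
  have hBalt : calculate_ink_density_alt drops
      = (0 + (allCells.countP (fun p => c p = 0) : Int), (allCells.map c).foldl max 0) := by
    rw [alt_allCells]
    have hcong : allCells.foldl (fun s p =>
          let d : Int := drops.foldl (fun d t =>
            if (p.1 - t.2.1, p.2 - t.1) ∈ PySem.List.pyGetD [inkSmall, inkMed, inkLarge] (t.2.2 - 1) []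
            then d + 1 else d) 0
          (if d = 0 then s.1 + 1 else s.1, if s.2 < d then d else s.2)) ((0 : Int), (0 : Int))
        = allCells.foldl (fun s p =>
            (if c p = 0 then s.1 + 1 else s.1, if s.2 < c p then c p else s.2))
          ((0 : Int), (0 : Int)) := by
      refine PySem.List.foldl_congr_mem _ _ _ _ ?_
      intro acc p hp
      simp only [hdval p hp]
    rw [hcong, bfold_char c allCells 0 0]
  simp only [calculate_ink_density, hboard, hzeroA, hmaxA, hBalt, zero_add]

-- ===== VERDICT  (by name: the statement is the Claim_ definition above) =====
theorem calculate_ink_density_spec : Claim_equal_calculate_ink_density := by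
  intro drops _ hPre
  exact AB_eq drops hPre
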